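-- pv_equiv track=rewrite | github.com/CyberRik/Ritankar-Mondal_CH23B105_IITM | evaluation/metrics.py | _count_agent_overlaps
-- ===== SOURCE A (Python) =====
-- from typing import List, Dict, Any
-- from collections import defaultdict
--
-- def _count_agent_overlaps(conv: Dict) -> int:
--     """Count overlapping responsibilities in conversation"""
--     overlaps = 0
--     agent_responsibilities = defaultdict(list)
--
--     for turn in conv["turns"]:
--         agent = turn["routed_agent"]
--         category = turn.get("category", "unknown")
--         agent_responsibilities[agent].append(category)
--
--     # Check for overlaps
--     for agent, responsibilities in agent_responsibilities.items():
--         if len(set(responsibilities)) > 1: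
--             overlaps += 1
--
--     return overlaps
-- ===== SOURCE B (Python) =====
-- def _count_agent_overlaps(conv):
--     """Count overlapping responsibilities in conversation"""
--     first_cat = {}
--     flagged = set()
--     for turn in conv["turns"]:
--         agent = turn["routed_agent"]
--         category = turn.get("category", "unknown")
--         if agent not in first_cat:
--             first_cat[agent] = category
--         elif first_cat[agent] != category:
--             flagged.add(agent)
--     return len(flagged)
-- ===== Notes on version B (the rewrite author's own statement) =====
-- stated objective: simpler
-- what changed: One pass keeping only each agent's first-seen category and a set of flagged agents, instead of materializing per-agent category lists and a second loop that builds a set per agent.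
import Mathlib
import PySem

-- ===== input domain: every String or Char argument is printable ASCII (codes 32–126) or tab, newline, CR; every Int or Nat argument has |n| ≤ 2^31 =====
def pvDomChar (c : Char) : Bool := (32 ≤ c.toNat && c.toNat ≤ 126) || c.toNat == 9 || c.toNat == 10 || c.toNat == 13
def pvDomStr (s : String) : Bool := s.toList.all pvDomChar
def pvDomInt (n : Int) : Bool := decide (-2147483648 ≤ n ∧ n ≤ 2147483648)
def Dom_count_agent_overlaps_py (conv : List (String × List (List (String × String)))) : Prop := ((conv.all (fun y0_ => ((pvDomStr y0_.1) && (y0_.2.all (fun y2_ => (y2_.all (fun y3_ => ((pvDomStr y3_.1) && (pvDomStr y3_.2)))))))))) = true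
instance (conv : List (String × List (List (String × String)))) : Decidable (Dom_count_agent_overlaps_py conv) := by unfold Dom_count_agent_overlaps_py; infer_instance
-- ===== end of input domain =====

-- B replaces A's per-agent category lists plus a second counting loop by a single pass that
-- keeps only each agent's first-seen category and a set of flagged agents (objective: simpler).

-- ===== PORT A =====
-- the grouping loop: agent_responsibilities[agent].append(category)
def pvAstep (d : PySem.Dict String (List String)) (turn : List (String × String)) :
    PySem.Dict String (List String) :=
  match (PySem.Dict.mk turn).get? "routed_agent" with
  | none => d   -- Python raises KeyError here; excluded by Pre_
  | some agent =>
      d.modify agent [] (· ++ [(PySem.Dict.mk turn).getD "category" "unknown"])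

def pvAgroup (turns : List (List (String × String))) : PySem.Dict String (List String) :=
  turns.foldl pvAstep PySem.Dict.empty

def count_agent_overlaps_py (conv : List (String × List (List (String × String)))) : Int :=
  match (PySem.Dict.mk conv).get? "turns" with
  | none => 0   -- Python raises KeyError here; excluded by Pre_
  | some turns =>
      (pvAgroup turns).items.foldl
        (fun overlaps p =>
          if 1 < (PySem.Set.ofList p.2).length then overlaps + 1 else overlaps) 0

-- ===== PORT B =====
-- one step of B's single pass: state = (first-seen category per agent, flagged agents)
def pvBstep (st : PySem.Dict String String × PySem.Set String)
    (turn : List (String × String)) : PySem.Dict String String × PySem.Set String :=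
  match (PySem.Dict.mk turn).get? "routed_agent" with
  | none => st   -- Python raises KeyError here; excluded by Pre_
  | some agent =>
      let category := (PySem.Dict.mk turn).getD "category" "unknown"
      match st.1.get? agent with
      | none => (st.1.insert agent category, st.2)
      | some first =>
          if first ≠ category then (st.1, PySem.Set.add st.2 agent) else st

def count_agent_overlaps_py_alt (conv : List (String × List (List (String × String)))) : Int :=
  match (PySem.Dict.mk conv).get? "turns" with
  | none => 0
  | some turns =>
      ((turns.foldl pvBstep (PySem.Dict.empty, PySem.Set.empty)).2.length : Int)

-- ===== PRECONDITION & SPEC =====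
-- Pre_ excludes exactly the inputs on which Python A raises KeyError:
-- a conversation without a "turns" key, or a turn without a "routed_agent" key.
def Pre_count_agent_overlaps_py (conv : List (String × List (List (String × String)))) : Prop :=
  (PySem.Dict.mk conv).contains "turns" = true ∧
  (((PySem.Dict.mk conv).getD "turns" []).all
    (fun turn => (PySem.Dict.mk turn).contains "routed_agent")) = true
instance (conv : List (String × List (List (String × String)))) : Decidable (Pre_count_agent_overlaps_py conv) := by unfold Pre_count_agent_overlaps_py; infer_instance

def pvWitness_count_agent_overlaps_py : (List (String × List (List (String × String)))) :=
  [("turns", [[("routed_agent", "a"), ("category", "x")],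
              [("routed_agent", "a"), ("category", "y")],
              [("routed_agent", "b")]])]

def Spec_count_agent_overlaps_py (conv : List (String × List (List (String × String)))) (out : Int) : Prop := out = count_agent_overlaps_py_alt conv
instance (conv : List (String × List (List (String × String)))) (out : Int) : Decidable (Spec_count_agent_overlaps_py conv out) := by unfold Spec_count_agent_overlaps_py; infer_instance

-- ===== CLAIM (what is proved, stated in full; the proofs are below) =====
def Claim_equal_count_agent_overlaps_py : Prop := ∀ (conv : List (String × List (List (String × String)))), Dom_count_agent_overlaps_py conv → Pre_count_agent_overlaps_py conv → Spec_count_agent_overlaps_py conv (count_agent_overlaps_py conv)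

-- ===== LEMMAS AND PROOFS =====

-- relation between A's per-agent category lists and B's (first-seen, flagged) state
def pvInv (d : PySem.Dict String (List String))
    (first : PySem.Dict String String) (flagged : PySem.Set String) : Prop :=
  d.keys.Nodup ∧ flagged.Nodup ∧
  (∀ a, first.get? a = (d.getD a []).head?) ∧
  (∀ a, a ∈ flagged ↔ ∃ c ∈ d.getD a [], (d.getD a []).head? ≠ some c)

theorem pvInv_empty : pvInv PySem.Dict.empty PySem.Dict.empty PySem.Set.empty := by
  refine ⟨by simp [PySem.Dict.keys, PySem.Dict.empty], List.nodup_nil, ?_, ?_⟩ <;>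
    simp [PySem.Dict.get?, PySem.Dict.getD, PySem.Dict.empty, PySem.Set.empty]

theorem pvGetD_ne_nil_mem_keys (d : PySem.Dict String (List String)) (a : String)
    (h : d.getD a [] ≠ []) : a ∈ d.keys := by
  by_contra hmem
  exact h (PySem.Dict.getD_of_not_contains d []
    (Bool.eq_false_iff.mpr (fun hc => hmem ((PySem.Dict.contains_iff_mem_keys d a).mp hc))))

theorem pvKeysNodup_modify (d : PySem.Dict String (List String)) (k : String)
    (f : List String → List String) (h : d.keys.Nodup) :
    (d.modify k [] f).keys.Nodup := by
  rw [PySem.Dict.keys_modify]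
  by_cases hc : d.contains k = true
  · rw [PySem.Dict.keys_insert_of_contains d _ hc]; exact h
  · rw [PySem.Dict.keys_insert_of_not_contains d _ (Bool.eq_false_iff.mpr hc)]
    refine List.Nodup.append h (List.nodup_singleton _) ?_
    intro x hx hy
    rw [List.mem_singleton] at hy; subst hy
    exact hc ((PySem.Dict.contains_iff_mem_keys d x).mpr hx)

theorem pvInv_step (d : PySem.Dict String (List String))
    (first : PySem.Dict String String) (flagged : PySem.Set String)
    (turn : List (String × String)) (h : pvInv d first flagged) :
    pvInv (pvAstep d turn) (pvBstep (first, flagged) turn).1 (pvBstep (first, flagged) turn).2 := by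
  obtain ⟨hnd, hfn, hfirst, hflag⟩ := h
  unfold pvAstep pvBstep
  cases hga : (PySem.Dict.mk turn).get? "routed_agent" with
  | none => exact ⟨hnd, hfn, hfirst, hflag⟩
  | some agent =>
    simp only
    set cat := (PySem.Dict.mk turn).getD "category" "unknown" with hcat
    cases hfa : first.get? agent with
    | none =>
      -- agent unseen: its category list is empty
      have hempty : d.getD agent [] = [] := by
        have hh := hfirst agent; rw [hfa] at hh
        exact List.head?_eq_none_iff.mp hh.symm
      refine ⟨pvKeysNodup_modify d agent _ hnd, hfn, ?_, ?_⟩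
      · intro a
        rw [PySem.Dict.get?_insert, PySem.Dict.getD_modify]
        by_cases hae : a = agent
        · subst hae
          rw [if_pos rfl, if_pos rfl, hempty]
          rfl
        · rw [if_neg hae, if_neg hae]
          exact hfirst a
      · intro a
        rw [PySem.Dict.getD_modify]
        by_cases hae : a = agent
        · subst hae
          rw [if_pos rfl, hempty]
          simp only [List.nil_append]
          constructor
          · intro hin
            have hx := (hflag a).mp hin
            rw [hempty] at hx
            simp at hx
          · rintro ⟨c, hc, hne⟩
            rw [List.mem_singleton] at hc; subst hc
            simp at hne
        · rw [if_neg hae]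
          exact hflag a
    | some firstc =>
      have hcons : ∃ t, d.getD agent [] = firstc :: t := by
        have hh := hfirst agent; rw [hfa] at hh
        cases hlg : d.getD agent [] with
        | nil => rw [hlg] at hh; simp at hh
        | cons x t =>
          rw [hlg] at hh; simp at hh
          exact ⟨t, by rw [hh]⟩
      obtain ⟨t, ht⟩ := hcons
      change pvInv (d.modify agent [] fun x => x ++ [cat])
        (if firstc ≠ cat then (first, flagged.add agent) else (first, flagged)).1
        (if firstc ≠ cat then (first, flagged.add agent) else (first, flagged)).2
      by_cases hne : firstc ≠ cat
      · rw [if_pos hne]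
        refine ⟨pvKeysNodup_modify d agent _ hnd, PySem.Set.nodup_add flagged agent hfn, ?_, ?_⟩
        · intro a
          rw [PySem.Dict.getD_modify]
          by_cases hae : a = agent
          · subst hae
            rw [if_pos rfl, ht, hfa]
            rfl
          · rw [if_neg hae]
            exact hfirst a
        · intro a
          rw [PySem.Set.mem_add, PySem.Dict.getD_modify]
          by_cases hae : a = agent
          · subst hae
            rw [if_pos rfl, ht]
            constructor
            · intro _
              exact ⟨cat, by simp, by simpa using hne⟩
            · intro _; right; rfl
          · rw [if_neg hae]
            constructor
            · intro hin
              rcases hin with hin | hin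
              · exact (hflag a).mp hin
              · exact absurd hin hae
            · intro hx
              exact Or.inl ((hflag a).mpr hx)
      · rw [if_neg hne]
        push_neg at hne
        refine ⟨pvKeysNodup_modify d agent _ hnd, hfn, ?_, ?_⟩
        · intro a
          rw [PySem.Dict.getD_modify]
          by_cases hae : a = agent
          · subst hae
            rw [if_pos rfl, ht, hfa]
            rfl
          · rw [if_neg hae]
            exact hfirst a
        · intro a
          rw [PySem.Dict.getD_modify]
          by_cases hae : a = agent
          · subst hae
            rw [if_pos rfl, ht, hflag a, ht]
            simp only [List.cons_append, List.head?_cons, List.mem_cons, List.mem_append,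
              List.mem_singleton]
            constructor
            · rintro ⟨c, hc, hcne⟩
              exact ⟨c, by rcases hc with hc | hc; exact Or.inl hc; exact Or.inr (Or.inl hc), hcne⟩
            · rintro ⟨c, hc, hcne⟩
              rcases hc with hc | hc | hc
              · exact ⟨c, Or.inl hc, hcne⟩
              · exact ⟨c, Or.inr hc, hcne⟩
              · rcases hc with hc | hc
                · subst hc; rw [hne] at hcne; simp at hcne
                · simp at hc
          · rw [if_neg hae]
            exact hflag a

theorem pvInv_foldl (turns : List (List (String × String)))
    (d : PySem.Dict String (List String))
    (first : PySem.Dict String String) (flagged : PySem.Set String)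
    (h : pvInv d first flagged) :
    pvInv (turns.foldl pvAstep d)
      (turns.foldl pvBstep (first, flagged)).1 (turns.foldl pvBstep (first, flagged)).2 := by
  induction turns generalizing d first flagged with
  | nil => exact h
  | cons turn ts ih =>
    simp only [List.foldl_cons]
    exact ih _ _ _ (pvInv_step d first flagged turn h)

theorem pvFoldlCount {α : Type} (P : α → Prop) [DecidablePred P] (l : List α) (i : Int) :
    l.foldl (fun n p => if P p then n + 1 else n) i
      = i + (l.countP (fun p => decide (P p)) : Int) := by
  induction l generalizing i with
  | nil => simp
  | cons x xs ih =>
    simp only [List.foldl_cons, List.countP_cons, ih]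
    by_cases hx : P x <;> simp [hx] <;> push_cast <;> ring

theorem pvPred (cs : List String) :
    (1 < (PySem.Set.ofList cs).length) ↔ ∃ c ∈ cs, cs.head? ≠ some c := by
  cases cs with
  | nil => simp [PySem.Set.ofList]
  | cons h t =>
    rw [PySem.Set.ofList_cons]
    simp only [List.length_cons, List.head?_cons, List.mem_cons]
    constructor
    · intro hlen
      have : 0 < (PySem.Set.discard (PySem.Set.ofList t) h).length := by omega
      obtain ⟨x, hx⟩ := List.exists_mem_of_length_pos this
      rw [PySem.Set.mem_discard] at hx
      exact ⟨x, Or.inr ((PySem.Set.mem_ofList _ _).mp hx.1), by simp [Ne.symm hx.2]⟩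
    · rintro ⟨c, hc, hne⟩
      rcases hc with hc | hc
      · subst hc; simp at hne
      · have : c ∈ PySem.Set.discard (PySem.Set.ofList t) h := by
          rw [PySem.Set.mem_discard, PySem.Set.mem_ofList]
          exact ⟨hc, fun hch => hne (by rw [hch])⟩
        have := List.length_pos_of_mem this
        omega

theorem pvCount_eq (d : PySem.Dict String (List String))
    (first : PySem.Dict String String) (flagged : PySem.Set String)
    (h : pvInv d first flagged) :
    d.items.foldl
      (fun overlaps p =>
        if 1 < (PySem.Set.ofList p.2).length then overlaps + 1 else overlaps) (0 : Int)
      = (flagged.length : Int) := by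
  obtain ⟨hnd, hfn, hflagged⟩ := h
  obtain ⟨hfirst, hflag⟩ := hflagged
  rw [pvFoldlCount (fun p : String × List String => 1 < (PySem.Set.ofList p.2).length)]
  rw [PySem.Dict.items_eq_map_keys d hnd [], List.countP_map]
  have hperm : flagged.Perm
      (d.keys.filter (fun a => decide (1 < (PySem.Set.ofList (d.getD a [])).length))) := by
    apply (List.perm_ext_iff_of_nodup hfn (hnd.filter _)).mpr
    intro a
    rw [List.mem_filter]
    constructor
    · intro hin
      have hx := (hflag a).mp hin
      obtain ⟨c, hc, _⟩ := hx
      refine ⟨pvGetD_ne_nil_mem_keys d a (by rintro hnil; rw [hnil] at hc; simp at hc), ?_⟩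
      simp only [decide_eq_true_eq]
      exact (pvPred _).mpr ((hflag a).mp hin)
    · rintro ⟨hk, hp⟩
      simp only [decide_eq_true_eq] at hp
      exact (hflag a).mpr ((pvPred _).mp hp)
  simp only [Function.comp_def]
  rw [List.countP_eq_length_filter, ← hperm.length_eq]
  simp

-- ===== VERDICT (by name: the statement is the Claim_ definition above) =====
theorem count_agent_overlaps_py_spec : Claim_equal_count_agent_overlaps_py := by
  intro conv _ _
  unfold Spec_count_agent_overlaps_py count_agent_overlaps_py count_agent_overlaps_py_alt
  cases hg : (PySem.Dict.mk conv).get? "turns" with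
  | none => rfl
  | some turns =>
    simp only
    exact pvCount_eq _ _ _ (pvInv_foldl turns _ _ _ pvInv_empty)
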